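-- pv_equiv track=rewrite | github.com/Seoyoung2/Algorithm_Study | Programmers/Level4/카드 게임.py | solution_ok
-- ===== SOURCE A (Python) =====
-- def solution_ok(left, right):
--     if max(left) > max(right):
--         return sum(right)
--     dp = [[0 for _ in range(len(right)+1)] for _ in range(len(left)+1)]
--
--     for i in reversed(range(len(left))):
--         for j in reversed(range(len(right))):
--             if left[j] > right[i]:
--                 dp[i][j] = dp[i+1][j] + right[i]
--             else:
--                 dp[i][j] = max(dp[i+1][j+1], dp[i][j+1])
--
--     return dp[0][0]
-- ===== SOURCE B (Python) =====
-- def solution_ok(left, right):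
--     if max(left) > max(right):
--         return sum(right)
--     memo = {}
--
--     def rec(i, j):
--         if i == len(left) or j == len(right):
--             return 0
--         if (i, j) in memo:
--             return memo[(i, j)]
--         if left[j] > right[i]:
--             res = rec(i + 1, j) + right[i]
--         else:
--             res = max(rec(i + 1, j + 1), rec(i, j + 1))
--         memo[(i, j)] = res
--         return res
--
--     return rec(0, 0)
-- ===== Notes on version B (the rewrite author's own statement) =====
-- stated objective: alternative
-- what changed: Replaced the bottom-up (len(left)+1)x(len(right)+1) DP table filled by nested reversed loops with a top-down memoized recursion rec(i,j) caching on a dict, computing only the states reachable from (0,0).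
import Mathlib
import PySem

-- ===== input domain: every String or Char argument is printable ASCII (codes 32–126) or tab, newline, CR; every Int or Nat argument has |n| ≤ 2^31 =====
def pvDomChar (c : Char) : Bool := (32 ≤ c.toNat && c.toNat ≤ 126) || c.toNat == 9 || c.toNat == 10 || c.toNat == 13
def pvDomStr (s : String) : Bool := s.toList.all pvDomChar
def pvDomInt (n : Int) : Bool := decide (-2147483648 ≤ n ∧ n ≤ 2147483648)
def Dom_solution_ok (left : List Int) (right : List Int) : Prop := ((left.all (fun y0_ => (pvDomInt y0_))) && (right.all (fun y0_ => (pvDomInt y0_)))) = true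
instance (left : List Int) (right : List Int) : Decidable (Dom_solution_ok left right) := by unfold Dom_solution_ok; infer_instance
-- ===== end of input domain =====

-- B replaces A's bottom-up DP table (nested reversed loops over a 2-D array) by a
-- top-down dict-memoized recursion over the same recurrence (objective: alternative).

-- ===== PORT A =====
-- inner loop 'for j in reversed(range(len(right)))'; list indexing is via getD 0:
-- inside Pre_ every index Python evaluates is in range (outside Pre_ Python raises).
def solAInner (left : List Int) (right : List Int) (i : Nat) (dp0 : List (List Int)) : List (List Int) :=
  (List.range right.length).reverse.foldl (fun dp j =>
    let v : Int :=
      if left.getD j 0 > right.getD i 0 then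
        (dp.getD (i+1) []).getD j 0 + right.getD i 0
      else
        max ((dp.getD (i+1) []).getD (j+1) 0) ((dp.getD i []).getD (j+1) 0)
    dp.set i ((dp.getD i []).set j v)) dp0

def solution_ok (left : List Int) (right : List Int) : Int :=
  match PySem.List.max? left (fun x => x), PySem.List.max? right (fun x => x) with
  | some ml, some mr =>
      if ml > mr then right.foldl (· + ·) 0
      else
        let dp0 : List (List Int) :=
          List.replicate (left.length + 1) (List.replicate (right.length + 1) (0 : Int))
        let dp := (List.range left.length).reverse.foldl
          (fun dp i => solAInner left right i dp) dp0
        (dp.getD 0 []).getD 0 0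
  | _, _ => 0   -- max([]) raises ValueError in Python; excluded by Pre_

-- ===== PORT B =====
-- rec(i, j) of Source B with the memo dict threaded through; Python tests
-- 'i == len(left) or j == len(right)' — the recursion only reaches i ≤ len(left),
-- j ≤ len(right), where '==' and '≥' coincide ('≥' gives the termination measure).
def solBRec (left : List Int) (right : List Int) (i : Nat) (j : Nat)
    (memo : PySem.Dict (Nat × Nat) Int) : Int × PySem.Dict (Nat × Nat) Int :=
  if h : left.length ≤ i ∨ right.length ≤ j then (0, memo)
  else
    match memo.get? (i, j) with
    | some v => (v, memo)
    | none =>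
      if left.getD j 0 > right.getD i 0 then
        let p := solBRec left right (i+1) j memo
        let res := p.1 + right.getD i 0
        (res, p.2.insert (i, j) res)
      else
        let p1 := solBRec left right (i+1) (j+1) memo
        let p2 := solBRec left right i (j+1) p1.2
        let res := max p1.1 p2.1
        (res, p2.2.insert (i, j) res)
termination_by (left.length - i) + (right.length - j)
decreasing_by all_goals omega

def solution_ok_alt (left : List Int) (right : List Int) : Int :=
  match PySem.List.max? left (fun x => x) with
  | none => 0   -- max([]) raises ValueError in Python; excluded by Pre_
  | some ml =>
    match PySem.List.max? right (fun x => x) with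
    | none => 0
    | some mr =>
      if ml > mr then right.foldl (· + ·) 0
      else (solBRec left right 0 0 PySem.Dict.empty).1

-- ===== PRECONDITION & SPEC =====
-- Python A raises ValueError on an empty list (max([])) and IndexError when the guard
-- does not fire and the lengths differ (left[j] runs over range(len(right)) and
-- right[i] over range(len(left))); Pre_ excludes exactly those inputs.
def Pre_solution_ok (left : List Int) (right : List Int) : Prop :=
  left ≠ [] ∧ right ≠ [] ∧
    (left.length = right.length ∨
      (PySem.List.max? left (fun x => x)).getD 0 > (PySem.List.max? right (fun x => x)).getD 0)
instance (left : List Int) (right : List Int) : Decidable (Pre_solution_ok left right) := by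
  unfold Pre_solution_ok; infer_instance
def pvWitness_solution_ok : List Int × List Int := ([1, 2], [2, 3])

def Spec_solution_ok (left : List Int) (right : List Int) (out : Int) : Prop := out = solution_ok_alt left right
instance (left : List Int) (right : List Int) (out : Int) : Decidable (Spec_solution_ok left right out) := by unfold Spec_solution_ok; infer_instance

-- ===== CLAIM (what is proved, stated in full; the proofs are below) =====
def Claim_equal_solution_ok : Prop := ∀ (left : List Int) (right : List Int), Dom_solution_ok left right → Pre_solution_ok left right → Spec_solution_ok left right (solution_ok left right)

-- ===== LEMMAS AND PROOFS =====

-- the pure DP recurrence both ports compute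
def gDP (left : List Int) (right : List Int) (i : Nat) (j : Nat) : Int :=
  if h : left.length ≤ i ∨ right.length ≤ j then 0
  else if left.getD j 0 > right.getD i 0 then gDP left right (i+1) j + right.getD i 0
  else max (gDP left right (i+1) (j+1)) (gDP left right i (j+1))
termination_by (left.length - i) + (right.length - j)
decreasing_by all_goals omega

def MemoOK (left : List Int) (right : List Int) (memo : PySem.Dict (Nat × Nat) Int) : Prop :=
  ∀ i j v, memo.get? (i, j) = some v → v = gDP left right i j

theorem memoOK_insert {left right : List Int} {memo : PySem.Dict (Nat × Nat) Int} {v : Int}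
    (h : MemoOK left right memo) (i j : Nat)
    (hv : v = gDP left right i j) :
    MemoOK left right (memo.insert (i, j) v) := by
  intro a b w hw
  rw [PySem.Dict.get?_insert] at hw
  split at hw
  · rename_i heq
    cases hw
    obtain ⟨h1, h2⟩ := Prod.mk.injEq .. ▸ heq
    subst h1; subst h2; exact hv
  · exact h a b w hw

theorem solBRec_correct (left right : List Int) (i j : Nat)
    (memo : PySem.Dict (Nat × Nat) Int) :
    MemoOK left right memo →
    (solBRec left right i j memo).1 = gDP left right i j ∧
      MemoOK left right (solBRec left right i j memo).2 := by
  fun_induction solBRec left right i j memo with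
  | case1 i j memo h =>
    intro hm
    exact ⟨by rw [gDP, dif_pos h], hm⟩
  | case2 i j memo hnb v hv =>
    intro hm
    exact ⟨hm _ _ _ hv, hm⟩
  | case3 i j memo hnb hnone hgt p res ih =>
    intro hm
    obtain ⟨e1, e2⟩ := ih hm
    have hval : res = gDP left right i j := by
      show (solBRec left right (i+1) j memo).1 + right.getD i 0 = gDP left right i j
      rw [e1]; conv_rhs => rw [gDP, dif_neg hnb, if_pos hgt]
    exact ⟨hval, memoOK_insert e2 i j hval⟩
  | case4 i j memo hnb hnone hgt p1 p2 res ih2 ih1 =>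
    intro hm
    obtain ⟨e1, e2⟩ := ih2 hm
    obtain ⟨f1, f2⟩ := ih1 e2
    have hval : res = gDP left right i j := by
      show max (solBRec left right (i+1) (j+1) memo).1 (solBRec left right i (j+1) p1.2).1 = gDP left right i j
      rw [e1, f1]; conv_rhs => rw [gDP, dif_neg hnb, if_neg hgt]
    exact ⟨hval, memoOK_insert f2 i j hval⟩

-- proof-side restatement of the inner-loop step
def stepA (left : List Int) (right : List Int) (i : Nat) (dp : List (List Int)) (j : Nat) : List (List Int) :=
  let v : Int :=
    if left.getD j 0 > right.getD i 0 then
      (dp.getD (i+1) []).getD j 0 + right.getD i 0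
    else
      max ((dp.getD (i+1) []).getD (j+1) 0) ((dp.getD i []).getD (j+1) 0)
  dp.set i ((dp.getD i []).set j v)

theorem solAInner_eq (left right : List Int) (i : Nat) (dp0 : List (List Int)) :
    solAInner left right i dp0 = (List.range right.length).reverse.foldl (stepA left right i) dp0 := rfl

theorem getD_set_self {α : Type} (l : List α) (i : Nat) (x d : α) (h : i < l.length) :
    (l.set i x).getD i d = x := by
  simp [List.getD, h]

theorem getD_set_ne {α : Type} (l : List α) (i r : Nat) (x d : α) (h : r ≠ i) :
    (l.set i x).getD r d = l.getD r d := by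
  simp [List.getD, List.getElem?_set_ne (Ne.symm h)]

theorem getD_replicate {α : Type} (k r : Nat) (a d : α) (h : r < k) :
    (List.replicate k a).getD r d = a := by
  simp [List.getD, h]

def ent (dp : List (List Int)) (r c : Nat) : Int := (dp.getD r []).getD c 0

theorem inner_inv (left right : List Int) (i : Nat) (hi : i < left.length) :
    ∀ k, k ≤ right.length → ∀ dp : List (List Int),
      dp.length = left.length + 1 →
      (∀ r, r < left.length + 1 → (dp.getD r []).length = right.length + 1) →
      (∀ r c, i < r → ent dp r c = gDP left right r c) →
      (∀ c, k ≤ c → ent dp i c = gDP left right i c) →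
      ((List.foldl (stepA left right i) dp (List.range k).reverse).length = left.length + 1 ∧
       (∀ r, r < left.length + 1 →
          ((List.foldl (stepA left right i) dp (List.range k).reverse).getD r []).length = right.length + 1) ∧
       (∀ r c, r ≠ i → ent (List.foldl (stepA left right i) dp (List.range k).reverse) r c = ent dp r c) ∧
       (∀ c, ent (List.foldl (stepA left right i) dp (List.range k).reverse) i c = gDP left right i c)) := by
  intro k
  induction k with
  | zero =>
    intro _ dp h1 h2 h3 h4
    exact ⟨h1, h2, fun _ _ _ => rfl, fun c => h4 c (Nat.zero_le c)⟩
  | succ k ih =>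
    intro hk dp h1 h2 h3 h4
    rw [List.range_succ, List.reverse_append, List.reverse_singleton, List.singleton_append,
      List.foldl_cons]
    have hrowlen : (dp.getD i []).length = right.length + 1 := h2 i (by omega)
    have hvval : (if left.getD k 0 > right.getD i 0 then
          (dp.getD (i+1) []).getD k 0 + right.getD i 0
        else
          max ((dp.getD (i+1) []).getD (k+1) 0) ((dp.getD i []).getD (k+1) 0))
        = gDP left right i k := by
      conv_rhs => rw [gDP, dif_neg (by omega : ¬ (left.length ≤ i ∨ right.length ≤ k))]
      by_cases hc : left.getD k 0 > right.getD i 0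
      · rw [if_pos hc, if_pos hc]
        have := h3 (i+1) k (Nat.lt_succ_self i)
        simp only [ent] at this; rw [this]
      · rw [if_neg hc, if_neg hc]
        have e1 := h3 (i+1) (k+1) (Nat.lt_succ_self i)
        have e2 := h4 (k+1) (le_refl _)
        simp only [ent] at e1 e2; rw [e1, e2]
    have hstep : stepA left right i dp k = dp.set i ((dp.getD i []).set k (gDP left right i k)) := by
      rw [stepA]; rw [hvval]
    rw [hstep]
    have hlen1 : (dp.set i ((dp.getD i []).set k (gDP left right i k))).length = left.length + 1 := by
      rw [List.length_set, h1]
    have hrows1 : ∀ r, r < left.length + 1 →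
        ((dp.set i ((dp.getD i []).set k (gDP left right i k))).getD r []).length = right.length + 1 := by
      intro r hr
      by_cases hri : r = i
      · rw [hri]
        rw [getD_set_self dp i _ [] (by omega), List.length_set, hrowlen]
      · rw [getD_set_ne dp i r _ [] hri]; exact h2 r hr
    have hent1_ne : ∀ r c, r ≠ i →
        ent (dp.set i ((dp.getD i []).set k (gDP left right i k))) r c = ent dp r c := by
      intro r c hr
      simp only [ent]
      rw [getD_set_ne dp i r _ [] hr]
    have hent1_i : ∀ c, k ≤ c →
        ent (dp.set i ((dp.getD i []).set k (gDP left right i k))) i c = gDP left right i c := by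
      intro c hc
      by_cases hck : c = k
      · rw [hck]
        simp only [ent]
        rw [getD_set_self dp i _ [] (by omega), getD_set_self (dp.getD i []) k _ 0 (by omega)]
      · simp only [ent]
        rw [getD_set_self dp i _ [] (by omega), getD_set_ne (dp.getD i []) k c _ 0 hck]
        exact h4 c (by omega)
    have h3' : ∀ r c, i < r →
        ent (dp.set i ((dp.getD i []).set k (gDP left right i k))) r c = gDP left right r c := by
      intro r c hr
      rw [hent1_ne r c (by omega)]; exact h3 r c hr
    obtain ⟨q1, q2, q3, q4⟩ := ih (by omega) _ hlen1 hrows1 h3' hent1_i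
    refine ⟨q1, q2, ?_, q4⟩
    intro r c hr
    rw [q3 r c hr]; exact hent1_ne r c hr

theorem outer_inv (left right : List Int) :
    ∀ k, k ≤ left.length → ∀ dp : List (List Int),
      dp.length = left.length + 1 →
      (∀ r, r < left.length + 1 → (dp.getD r []).length = right.length + 1) →
      (∀ r c, k ≤ r → ent dp r c = gDP left right r c) →
      (∀ r c, r < k → ent dp r c = 0) →
      ∀ r c, ent (List.foldl (fun dp i => solAInner left right i dp) dp (List.range k).reverse) r c
        = gDP left right r c := by
  intro k
  induction k with
  | zero =>
    intro _ dp _ _ h3 _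
    exact fun r c => h3 r c (Nat.zero_le r)
  | succ k ih =>
    intro hk dp h1 h2 h3 h4
    rw [List.range_succ, List.reverse_append, List.reverse_singleton, List.singleton_append,
      List.foldl_cons]
    have hrowk : ∀ c, (right.length : Nat) ≤ c → ent dp k c = gDP left right k c := by
      intro c hc
      rw [h4 k c (by omega), gDP, dif_pos (Or.inr hc)]
    obtain ⟨q1, q2, q3, q4⟩ :=
      inner_inv left right k (by omega) right.length (le_refl _) dp h1 h2
        (fun r c hr => h3 r c (by omega)) hrowk
    rw [solAInner_eq] at *
    apply ih (by omega) _ q1 q2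
    · intro r c hr
      by_cases hrk : r = k
      · rw [hrk]; exact q4 c
      · rw [q3 r c hrk]; exact h3 r c (by omega)
    · intro r c hr
      rw [q3 r c (by omega)]; exact h4 r c (by omega)

theorem ent_replicate (n m r c : Nat) :
    ent (List.replicate n (List.replicate m (0 : Int))) r c = 0 := by
  simp only [ent, List.getD, List.getElem?_replicate]
  split <;> simp

theorem table_eq (left right : List Int) :
    ((List.foldl (fun dp i => solAInner left right i dp)
        (List.replicate (left.length + 1) (List.replicate (right.length + 1) (0 : Int)))
        (List.range left.length).reverse).getD 0 []).getD 0 0 = gDP left right 0 0 := by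
  have h := outer_inv left right left.length (le_refl _)
    (List.replicate (left.length + 1) (List.replicate (right.length + 1) (0 : Int)))
    (by simp)
    (fun r hr => by rw [getD_replicate _ _ _ _ hr, List.length_replicate])
    (fun r c hr => by rw [ent_replicate, gDP, dif_pos (Or.inl hr)])
    (fun r c hr => ent_replicate _ _ _ _)
  exact h 0 0

theorem memoOK_empty (left right : List Int) : MemoOK left right PySem.Dict.empty := by
  intro i j v hv
  simp [PySem.Dict.get?_empty] at hv

-- ===== VERDICT (by name: the statement is the Claim_ definition above) =====
theorem solution_ok_spec : Claim_equal_solution_ok := by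
  intro left right _ _
  unfold Spec_solution_ok solution_ok solution_ok_alt
  cases hl : PySem.List.max? left (fun x => x) with
  | none => rfl
  | some ml =>
    cases hr : PySem.List.max? right (fun x => x) with
    | none => rfl
    | some mr =>
      by_cases hg : ml > mr
      · simp only [if_pos hg]
      · simp only [if_neg hg]
        rw [table_eq]
        exact ((solBRec_correct left right 0 0 PySem.Dict.empty (memoOK_empty left right)).1).symm
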